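-- pv_equiv track=rewrite | github.com/mjendrusch/torchsupport | torchsupport/structured/chunkable.py | chunk_sizes
-- ===== SOURCE A (Python) =====
-- def chunk_sizes(lengths, num_targets):
--   num_entities = len(lengths)
--   chops = num_entities // num_targets
--   result = [
--     sum(lengths[idx * chops:(idx + 1) * chops])
--     for idx in range(num_targets)
--   ]
--   return result
-- ===== SOURCE B (Python) =====
-- def chunk_sizes(lengths, num_targets):
--   chops = len(lengths) // num_targets
--   result = [0] * num_targets
--   for i in range(num_targets * chops):
--     result[i // chops] += lengths[i]
--   return result
-- ===== Notes on version B (the rewrite author's own statement) =====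
-- stated objective: alternative
-- what changed: B replaces the per-target slice-and-sum comprehension (num_targets slices, each re-scanned by sum) by a single linear pass that routes each element lengths[i] into bucket i // chops of a preallocated result list.
-- outside the precondition, e.g. on chunk_sizes([1, 2, 3], -2): A returns [], B raises IndexError
import Mathlib
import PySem

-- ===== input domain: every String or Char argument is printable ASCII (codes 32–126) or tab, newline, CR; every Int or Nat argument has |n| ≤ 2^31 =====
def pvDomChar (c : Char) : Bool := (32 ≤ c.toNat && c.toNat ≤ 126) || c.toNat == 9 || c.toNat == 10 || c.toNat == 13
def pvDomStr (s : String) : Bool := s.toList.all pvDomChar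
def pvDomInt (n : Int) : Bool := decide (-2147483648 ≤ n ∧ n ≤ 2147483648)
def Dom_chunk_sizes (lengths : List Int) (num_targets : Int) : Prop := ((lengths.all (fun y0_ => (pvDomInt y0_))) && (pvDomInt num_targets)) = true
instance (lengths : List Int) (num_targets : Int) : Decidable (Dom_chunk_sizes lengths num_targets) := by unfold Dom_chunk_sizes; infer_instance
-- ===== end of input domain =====

-- B replaces the num_targets slice-and-sum passes by one linear pass that adds each
-- element into its bucket (objective: alternative decomposition, same cost).

-- ===== PORT A =====
def chunk_sizes (lengths : List Int) (num_targets : Int) : List Int :=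
  let num_entities : Int := (lengths.length : Int)
  let chops : Int := PySem.Int.floordiv num_entities num_targets
  (PySem.List.pyRange 0 num_targets 1).map (fun idx =>
    (PySem.List.slice lengths (some (idx * chops)) (some ((idx + 1) * chops))).sum)

-- ===== PORT B =====
-- loop body of Source B: result[i // chops] += lengths[i]
def pvBucketStep (lengths : List Int) (chops : Int) (res : List Int) (i : Int) : List Int :=
  res.set (PySem.Int.floordiv i chops).toNat
    (res.getD (PySem.Int.floordiv i chops).toNat 0 + PySem.List.pyGetD lengths i 0)

def chunk_sizes_alt (lengths : List Int) (num_targets : Int) : List Int :=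
  let chops : Int := PySem.Int.floordiv (lengths.length : Int) num_targets
  (PySem.List.pyRange 0 (num_targets * chops) 1).foldl (pvBucketStep lengths chops)
    (List.replicate num_targets.toNat 0)

-- ===== PRECONDITION & SPEC =====
-- Pre_ restricts to positive target counts (the natural domain of chunking): at
-- num_targets = 0 the Python A raises ZeroDivisionError, and for negative num_targets
-- A's empty result comes from range over a negative count while B raises IndexError.
def Pre_chunk_sizes (lengths : List Int) (num_targets : Int) : Prop := 0 < num_targets
instance (lengths : List Int) (num_targets : Int) : Decidable (Pre_chunk_sizes lengths num_targets) := by unfold Pre_chunk_sizes; infer_instance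

def pvWitness_chunk_sizes : List Int × Int := ([1, 2, 3, 4, 5], 2)

def Spec_chunk_sizes (lengths : List Int) (num_targets : Int) (out : List Int) : Prop := out = chunk_sizes_alt lengths num_targets
instance (lengths : List Int) (num_targets : Int) (out : List Int) : Decidable (Spec_chunk_sizes lengths num_targets out) := by unfold Spec_chunk_sizes; infer_instance

-- ===== CLAIM (what is proved, stated in full; the proofs are below) =====
def Claim_equal_chunk_sizes : Prop := ∀ (lengths : List Int) (num_targets : Int), Dom_chunk_sizes lengths num_targets → Pre_chunk_sizes lengths num_targets → Spec_chunk_sizes lengths num_targets (chunk_sizes lengths num_targets)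

-- ===== LEMMAS AND PROOFS =====

-- summing xs[i] over i ∈ range(a, b) is the sum of the slice xs[a:b]
lemma pvSumMapPyGetD (xs : List Int) (a b : Nat) (hb : b ≤ xs.length) :
    ((PySem.List.pyRange (a : Int) (b : Int) 1).map (fun i => PySem.List.pyGetD xs i 0)).sum
      = ((xs.drop a).take (b - a)).sum := by
  induction hd : b - a generalizing a with
  | zero =>
    rw [PySem.List.pyRange_one_eq_nil (by exact_mod_cast Nat.le_of_sub_eq_zero hd)]
    simp
  | succ n ih =>
    have hab : a < b := by omega
    have halen : a < xs.length := by omega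
    rw [PySem.List.pyRange_one_cons (by exact_mod_cast hab)]
    have h1 : ((a : Int) + 1) = ((a + 1 : Nat) : Int) := by push_cast; ring
    rw [List.map_cons, List.sum_cons, h1, ih (a + 1) (by omega)]
    rw [List.drop_eq_getElem_cons halen, List.take_succ_cons, List.sum_cons]
    simp [PySem.List.pyGetD_natCast, List.getElem?_eq_getElem halen]

-- one block of B's loop: all indices of range(a, b) land in bucket k, so the fold
-- adds the corresponding elements into the entry just after `done`
lemma pvBlockFold (xs : List Int) (c k : Nat)
    (a b : Nat) (ha : k * c ≤ a) (hb : b ≤ (k + 1) * c)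
    (done : List Int) (x : Int) (rest : List Int) (hd : done.length = k) :
    (PySem.List.pyRange (a : Int) (b : Int) 1).foldl (pvBucketStep xs (c : Int)) (done ++ x :: rest)
      = done ++ (x + ((PySem.List.pyRange (a : Int) (b : Int) 1).map (fun i => PySem.List.pyGetD xs i 0)).sum) :: rest := by
  induction hd' : b - a generalizing a x with
  | zero =>
    rw [PySem.List.pyRange_one_eq_nil (by exact_mod_cast Nat.le_of_sub_eq_zero hd')]
    simp
  | succ n ih =>
    have hab : a < b := by omega
    rw [PySem.List.pyRange_one_cons (by exact_mod_cast hab)]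
    have hac : a / c = k := Nat.div_eq_of_lt_le ha (by omega)
    have hstep : pvBucketStep xs (c : Int) (done ++ x :: rest) (a : Int)
        = done ++ (x + PySem.List.pyGetD xs (a : Int) 0) :: rest := by
      unfold pvBucketStep
      rw [PySem.Int.floordiv_natCast a c, hac]
      have hk : ((k : Int)).toNat = done.length := by simp [hd]
      rw [hk, List.set_append_right _ _ (le_refl _)]
      simp [List.getD]
    have h1 : ((a : Int) + 1) = ((a + 1 : Nat) : Int) := by push_cast; ring
    rw [List.foldl_cons, hstep, h1, ih (a + 1) (by omega) _ (by omega)]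
    rw [List.map_cons, List.sum_cons]
    ring_nf

-- after the first k blocks, the first k buckets hold their sums and the rest are 0
lemma pvMainFold (xs : List Int) (t c : Nat) (hc : 0 < c) (htc : t * c ≤ xs.length)
    (k : Nat) (hk : k ≤ t) :
    (PySem.List.pyRange 0 ((k : Int) * (c : Int)) 1).foldl (pvBucketStep xs (c : Int)) (List.replicate t 0)
      = (List.range k).map (fun idx => ((xs.drop (idx * c)).take c).sum) ++ List.replicate (t - k) (0 : Int) := by
  induction k with
  | zero => simp [PySem.List.pyRange_one_eq_nil]
  | succ k ih =>
    have hcast : ((k + 1 : Nat) : Int) * (c : Int) = (((k + 1) * c : Nat) : Int) := by push_cast; ring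
    have hcast2 : ((k : Nat) : Int) * (c : Int) = (((k * c : Nat)) : Int) := by push_cast; ring
    have ih' := ih (by omega)
    rw [hcast2] at ih'
    rw [hcast, PySem.List.pyRange_one_append 0 ((k * c : Nat) : Int) (((k + 1) * c : Nat) : Int)
          (by positivity) (by exact_mod_cast Nat.mul_le_mul_right c (by omega))]
    rw [List.foldl_append, ih']
    have hrep : List.replicate (t - k) (0 : Int) = 0 :: List.replicate (t - (k + 1)) (0 : Int) := by
      have : t - k = (t - (k + 1)) + 1 := by omega
      rw [this, List.replicate_succ]
    rw [hrep, pvBlockFold xs c k (k * c) ((k + 1) * c) (le_refl _) (le_refl _) _ _ _ (by simp)]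
    rw [pvSumMapPyGetD xs (k * c) ((k + 1) * c) (le_trans (Nat.mul_le_mul_right c hk) htc)]
    have : (k + 1) * c - k * c = c := by ring_nf; omega
    rw [this, List.range_succ, List.map_append, List.map_singleton, List.append_assoc]
    simp

theorem chunk_sizes_spec : Claim_equal_chunk_sizes := by
  intro lengths num_targets _ hpre
  unfold Spec_chunk_sizes chunk_sizes chunk_sizes_alt
  have hpre' : (0 : Int) < num_targets := hpre
  obtain ⟨t, rfl⟩ : ∃ t : Nat, num_targets = (t : Int) :=
    ⟨num_targets.toNat, (Int.toNat_of_nonneg (le_of_lt hpre')).symm⟩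
  have ht : 0 < t := by exact_mod_cast hpre'
  have hchops : PySem.Int.floordiv (lengths.length : Int) (t : Int)
      = ((lengths.length / t : Nat) : Int) := PySem.Int.floordiv_natCast _ t
  simp only [hchops, Int.toNat_natCast]
  by_cases hc : lengths.length / t = 0
  · -- fewer entities than targets: every slice is empty and B's loop is empty
    rw [hc]
    simp only [Nat.cast_zero, mul_zero]
    rw [PySem.List.pyRange_one_eq_nil (a := 0) (b := 0) (le_refl 0)]
    rw [PySem.List.pyRange_one 0 (t : Int)]
    simp [PySem.List.slice_to, List.eq_replicate_iff]
  · have hc' : 0 < lengths.length / t := Nat.pos_of_ne_zero hc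
    have htc : t * (lengths.length / t) ≤ lengths.length := by
      calc t * (lengths.length / t) = (lengths.length / t) * t := Nat.mul_comm _ _
        _ ≤ lengths.length := Nat.div_mul_le_self _ t
    rw [pvMainFold lengths t (lengths.length / t) hc' htc t (le_refl t)]
    rw [PySem.List.pyRange_one 0 (t : Int)]
    simp only [Int.sub_zero, Int.toNat_natCast, Nat.sub_self, List.replicate_zero,
      List.append_nil, List.map_map]
    apply List.map_congr_left
    intro j hj
    simp only [Function.comp_apply, Int.zero_add]
    have h1 : ((j : Int)) * ((lengths.length / t : Nat) : Int)
        = ((j * (lengths.length / t) : Nat) : Int) := by push_cast; ring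
    have h2 : ((j : Int) + 1) * ((lengths.length / t : Nat) : Int)
        = (((j * (lengths.length / t)) + (lengths.length / t) : Nat) : Int) := by push_cast; ring
    rw [h1, h2, PySem.List.slice_natCast]
    have h3 : j * (lengths.length / t) + lengths.length / t - j * (lengths.length / t)
        = lengths.length / t := by omega
    rw [h3]
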